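-- pv_equiv track=rewrite | github.com/drawnator/p1UFCG | ofuscador.py | ofuscador
-- ===== SOURCE A (Python) =====
-- def ofuscador(linha):
--     # mapa para trocar maiusculas por minusculas
--     mapa_letras = {}
--     for i in range(26):
--         mapa_letras[65+i] = chr(97+i)
--         mapa_letras[97+i] = chr(65+i)
--
--     # mapa para trocar as letras por numeros e
--     mapa_transforma ={
--     ord('a'): '4',ord('A'): '4',ord('4'): 'A',
--     ord('b'): '8',ord('B'): '8',ord('8'): 'B',
--     ord('e'): '3',ord('E'): '3',ord('3'): 'E',
--     ord('g'): '6',ord('G'): '6',ord('6'): 'G',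
--     ord('i'): '1',ord('I'): '1',ord('1'): 'I',
--     ord('l'): '7',ord('L'): '7',ord('7'): 'L',
--     ord('s'): '5',ord('S'): '5',ord('5'): 'S',
--     ord('o'): '0',ord('O'): '0',ord('0'): 'O'
--     }
--
--     #juntar os dois mapas
--     for indice in mapa_transforma:
--         mapa_letras[indice] = mapa_transforma[indice]
--
--     #tratamento de texto
--     saida = ''
--     tamanho_palavra = 0
--     for letra in linha:
--         ocorreu_troca = 0
--         #adiciona espaços
--         if letra == ' ':
--             ocorreu_troca = 1
--             for i in range(tamanho_palavra):
--                 saida += '*'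
--             tamanho_palavra = 0
--         else:
--             tamanho_palavra +=1
--
--         #troca caracteres
--         ordletra = ord(letra)
--         for indice in mapa_letras:
--             if indice == ordletra:
--                 saida += mapa_letras[indice]
--                 ocorreu_troca = 1
--
--         #insere o caractere caso não tenha ocorrido trocas
--         if ocorreu_troca == 0:
--             saida += letra
--
--     return saida
-- ===== SOURCE B (Python) =====
-- def ofuscador(linha):
--     # tabela de traducao estilo str.maketrans: troca de caixa + leetspeak
--     tabela = {}
--     for i in range(26):
--         tabela[65 + i] = chr(97 + i)
--         tabela[97 + i] = chr(65 + i)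
--     for letra, numero in zip('abegilso', '48361750'):
--         tabela[ord(letra)] = numero
--         tabela[ord(letra.upper())] = numero
--         tabela[ord(numero)] = letra.upper()
--
--     def traduz(palavra):
--         return ''.join(tabela.get(ord(c), c) for c in palavra)
--
--     palavras = linha.split(' ')
--     saida = traduz(palavras[0])
--     for anterior, palavra in zip(palavras, palavras[1:]):
--         saida += '*' * len(anterior) + traduz(palavra)
--     return saida
-- ===== Notes on version B (the rewrite author's own statement) =====
-- stated objective: faster
-- what changed: A's per-character state machine (word-length counter, asterisk-emitting inner loop, and a linear scan of the whole 60-entry substitution dict for every character) is replaced by a split-on-space / translate-each-word / join pass: the line is split into words, each word is translated by direct table lookup, and each space becomes as many asterisks as the preceding word is long.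
import Mathlib
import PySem

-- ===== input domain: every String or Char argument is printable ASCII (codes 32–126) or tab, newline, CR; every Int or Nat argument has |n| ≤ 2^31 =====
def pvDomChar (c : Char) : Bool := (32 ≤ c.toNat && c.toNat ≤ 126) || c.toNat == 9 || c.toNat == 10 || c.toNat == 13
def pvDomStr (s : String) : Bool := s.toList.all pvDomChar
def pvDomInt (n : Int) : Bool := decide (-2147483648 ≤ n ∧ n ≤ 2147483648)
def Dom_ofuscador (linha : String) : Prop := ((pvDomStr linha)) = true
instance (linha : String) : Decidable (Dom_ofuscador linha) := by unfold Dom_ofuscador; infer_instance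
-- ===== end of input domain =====

-- B replaces A's per-character state machine (word-length counter + linear scan of the whole
-- substitution dict for every character) by a split-on-space / translate-each-word /
-- join-with-asterisks pass over a direct-lookup table (measured faster: drops the per-character dict scan).

-- ===== PORT A =====
-- dict literal mapa_transforma (ord keys, in source order)
def mapaTransforma : PySem.Dict Int String := PySem.Dict.ofList
  [(97,"4"),(65,"4"),(52,"A"),
   (98,"8"),(66,"8"),(56,"B"),
   (101,"3"),(69,"3"),(51,"E"),
   (103,"6"),(71,"6"),(54,"G"),
   (105,"1"),(73,"1"),(49,"I"),
   (108,"7"),(76,"7"),(55,"L"),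
   (115,"5"),(83,"5"),(53,"S"),
   (111,"0"),(79,"0"),(48,"O")]

-- mapa_letras: the case-swap loop, then the merge loop 'for indice in mapa_transforma: …'
def mapaLetras : PySem.Dict Int String :=
  let base := (PySem.List.pyRange 0 26 1).foldl (fun d i =>
    (d.insert (65 + i) (String.singleton (Char.ofNat (97 + i).toNat))).insert (97 + i)
      (String.singleton (Char.ofNat (65 + i).toNat))) PySem.Dict.empty
  mapaTransforma.keys.foldl (fun d indice => d.insert indice (mapaTransforma.getD indice "")) base

-- the body of A's 'for letra in linha' loop; state = (saida, tamanho_palavra)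
def ofuscadorStep (st : List Char × Nat) (letra : Char) : List Char × Nat :=
  let ocorreu : Nat := 0
  let st1 : List Char × Nat × Nat :=
    if letra == ' ' then
      ((PySem.List.pyRange 0 (st.2 : Int) 1).foldl (fun s _ => s ++ ['*']) st.1, 0, 1)
    else (st.1, st.2 + 1, ocorreu)
  let ordletra : Int := (letra.toNat : Int)
  let p : List Char × Nat := mapaLetras.keys.foldl
    (fun (q : List Char × Nat) indice =>
      if indice == ordletra then (q.1 ++ (mapaLetras.getD indice "").toList, 1) else q)
    (st1.1, st1.2.2)
  let saida := if p.2 == 0 then p.1 ++ [letra] else p.1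
  (saida, st1.2.1)

def ofuscador (linha : String) : String :=
  String.ofList (linha.toList.foldl ofuscadorStep ([], 0)).1

-- ===== PORT B =====
-- the translation table: case swap for the 26 letters, then the leet overrides
def tabelaB : PySem.Dict Int String :=
  let t := (PySem.List.pyRange 0 26 1).foldl (fun d i =>
    (d.insert (65 + i) (String.singleton (Char.ofNat (97 + i).toNat))).insert (97 + i)
      (String.singleton (Char.ofNat (65 + i).toNat))) PySem.Dict.empty
  (List.zip "abegilso".toList "48361750".toList).foldl (fun d p =>
    ((d.insert ((p.1.toNat : Int)) (String.singleton p.2)).insert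
        (((PySem.Chars.upperChar p.1).toNat : Int)) (String.singleton p.2)).insert
      ((p.2.toNat : Int)) (String.singleton (PySem.Chars.upperChar p.1))) t

-- traduz(palavra) = ''.join(tabela.get(ord(c), c) for c in palavra)
def traduzB (palavra : List Char) : List Char :=
  PySem.Chars.join [] (palavra.map (fun c => (tabelaB.getD ((c.toNat : Int)) (String.singleton c)).toList))

def ofuscador_alt (linha : String) : String :=
  let palavras := PySem.Chars.splitOn linha.toList [' ']
  -- split(' ') never returns an empty list, so palavras[0] always exists; '.getD []' only makes the lookup total
  let saida := traduzB ((PySem.List.pyGet? palavras 0).getD [])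
  let pares := List.zip palavras (PySem.List.slice palavras (some 1) none)
  String.ofList (pares.foldl (fun s pr => s ++ List.replicate pr.1.length '*' ++ traduzB pr.2) saida)

-- ===== PRECONDITION & SPEC =====
def Spec_ofuscador (linha : String) (out : String) : Prop := out = ofuscador_alt linha
instance (linha : String) (out : String) : Decidable (Spec_ofuscador linha out) := by unfold Spec_ofuscador; infer_instance

-- ===== CLAIM (what is proved, stated in full; the proofs are below) =====
def Claim_equal_ofuscador : Prop := ∀ (linha : String), Dom_ofuscador linha → Spec_ofuscador linha (ofuscador linha)

-- ===== LEMMAS AND PROOFS =====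

-- the per-character translation both programs implement
def trC (c : Char) : List Char :=
  ((mapaLetras.get? ((c.toNat : Int))).map String.toList).getD [c]

def trW (w : List Char) : List Char := (w.map trC).flatten

-- concrete facts about the (closed) dictionaries
set_option maxRecDepth 100000 in
theorem mapaLetras_nodup : mapaLetras.keys.Nodup := by decide

set_option maxRecDepth 100000 in
theorem mapaLetras_space : mapaLetras.get? 32 = none := by decide

set_option maxRecDepth 1000000 in
theorem tabelaB_eq : tabelaB = mapaLetras := PySem.Dict.ext (by decide)

-- A's inner 'for indice in mapa_letras' scan: no key matches → state unchanged
theorem scan_absent (f : Int → List Char) (k : Int) :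
    ∀ (l : List Int), k ∉ l → ∀ (q : List Char × Nat),
      l.foldl (fun q i => if i == k then (q.1 ++ f i, 1) else q) q = q := by
  intro l
  induction l with
  | nil => intro _ q; rfl
  | cons i t ih =>
    intro h q
    simp only [List.mem_cons, not_or] at h
    simp only [List.foldl_cons]
    rw [if_neg (by simpa using Ne.symm h.1), ih h.2]

-- the scan over an association list with distinct keys finds exactly the dict lookup
theorem scan_items (f : Int → List Char) (k : Int) :
    ∀ (l : List (Int × String)), (l.map Prod.fst).Nodup →
      (∀ p ∈ l, f p.1 = p.2.toList) → ∀ (s : List Char) (oc : Nat),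
      (l.map Prod.fst).foldl (fun q i => if i == k then (q.1 ++ f i, 1) else q) (s, oc)
      = match (l.find? (fun p => p.1 == k)).map (·.2) with
        | some v => (s ++ v.toList, 1)
        | none => (s, oc) := by
  intro l
  induction l with
  | nil => intro _ _ s oc; rfl
  | cons p t ih =>
    obtain ⟨k0, v0⟩ := p
    intro hn hf s oc
    simp only [List.map_cons, List.nodup_cons] at hn
    by_cases h : k0 = k
    · subst h
      simp only [List.map_cons, List.foldl_cons, List.find?_cons, beq_self_eq_true, if_true]
      rw [hf ⟨k0, v0⟩ List.mem_cons_self, scan_absent f k0 _ hn.1]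
      rfl
    · have hb : (k0 == k) = false := by simpa using h
      simp only [List.map_cons, List.foldl_cons, List.find?_cons, hb, Bool.false_eq_true, if_false]
      exact ih hn.2 (fun q hq => hf q (List.mem_cons_of_mem _ hq)) s oc

set_option maxRecDepth 1000000 in
theorem scan_keys (k : Int) (s : List Char) (oc : Nat) :
    mapaLetras.keys.foldl
        (fun q i => if i == k then (q.1 ++ (mapaLetras.getD i "").toList, 1) else q) (s, oc)
      = match mapaLetras.get? k with
        | some v => (s ++ v.toList, 1)
        | none => (s, oc) :=
  scan_items (fun i => (mapaLetras.getD i "").toList) k mapaLetras.items mapaLetras_nodup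
    (fun p hp => by
      obtain ⟨k0, v0⟩ := p
      show (mapaLetras.getD k0 "").toList = v0.toList
      rw [PySem.Dict.getD_of_mem_items _ hp mapaLetras_nodup]) s oc

-- A's per-character step, abstractly
theorem step_eq (st : List Char × Nat) (c : Char) :
    ofuscadorStep st c
      = if c = ' ' then (st.1 ++ List.replicate st.2 '*', 0)
        else (st.1 ++ trC c, st.2 + 1) := by
  simp only [ofuscadorStep]
  by_cases h : c = ' '
  · subst h
    simp only [beq_self_eq_true, if_true]
    rw [scan_keys]
    rw [show ((' '.toNat : Nat) : Int) = 32 from rfl, mapaLetras_space]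
    simp
  · have hb : (c == ' ') = false := by simpa using h
    simp only [hb, Bool.false_eq_true, if_false, if_neg h]
    rw [scan_keys]
    cases hv : mapaLetras.get? ((c.toNat : Int)) with
    | none => simp [trC, hv]
    | some v => simp [trC, hv]

-- A's whole loop, abstractly: gA cs t = what A appends, starting mid-word of length t
def gA : List Char → Nat → List Char
  | [], _ => []
  | c :: r, t => if c = ' ' then List.replicate t '*' ++ gA r 0 else trC c ++ gA r (t + 1)

def kA : List Char → Nat → Nat
  | [], t => t
  | c :: r, t => if c = ' ' then kA r 0 else kA r (t + 1)

theorem foldA (cs : List Char) : ∀ (s : List Char) (t : Nat),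
    cs.foldl ofuscadorStep (s, t) = (s ++ gA cs t, kA cs t) := by
  induction cs with
  | nil => intro s t; simp [gA, kA]
  | cons c r ih =>
    intro s t
    rw [List.foldl_cons, step_eq]
    by_cases h : c = ' ' <;> simp [h, gA, kA, ih, List.append_assoc]

-- linha.split(' ') as a structural recursion: pySplitSp pre cs prepends pre to the current word
def pySplitSp : List Char → List Char → List (List Char)
  | pre, [] => [pre]
  | pre, c :: r => if c = ' ' then pre :: pySplitSp [] r else pySplitSp (pre ++ [c]) r

theorem splitOn_go_eq : ∀ (fuel : Nat) (l cur : List Char) (acc : List (List Char)),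
    l.length ≤ fuel →
    PySem.Chars.splitOn.go [' '] fuel l cur acc = acc.reverse ++ pySplitSp cur.reverse l := by
  intro fuel
  induction fuel with
  | zero =>
    intro l cur acc h
    rw [List.length_eq_zero_iff.mp (Nat.le_zero.mp h)]
    rw [PySem.Chars.splitOn.go]
    simp [pySplitSp]
  | succ m ih =>
    intro l cur acc h
    cases l with
    | nil =>
      rw [PySem.Chars.splitOn.go]
      simp [pySplitSp]
      omega
    | cons c rest =>
      rw [PySem.Chars.splitOn.go]
      simp only [List.length_cons] at h
      by_cases hc : c = ' '
      · subst hc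
        have hpre : [' '].isPrefixOf (' ' :: rest) = true := by simp [List.isPrefixOf]
        simp only [hpre, List.length_singleton, List.drop_one, List.tail_cons]
        rw [ih rest [] (cur.reverse :: acc) (by omega)]
        simp [pySplitSp]
      · have hpre : [' '].isPrefixOf (c :: rest) = false := by
          simp [List.isPrefixOf, Ne.symm hc]
        simp only [hpre, Bool.false_eq_true, if_false]
        rw [ih rest (c :: cur) acc (by omega)]
        simp [pySplitSp, hc]

theorem splitOn_eq (cs : List Char) :
    PySem.Chars.splitOn cs [' '] = pySplitSp [] cs := by
  unfold PySem.Chars.splitOn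
  rw [splitOn_go_eq (cs.length + 1) cs [] [] (by omega)]
  rfl

theorem pySplitSp_ne_nil : ∀ (pre cs : List Char), pySplitSp pre cs ≠ [] := by
  intro pre cs
  induction cs generalizing pre with
  | nil => simp [pySplitSp]
  | cons c r ih => by_cases h : c = ' ' <;> simp [pySplitSp, h, ih]

-- B's output shape
def renderTail : Nat → List (List Char) → List Char
  | _, [] => []
  | n, w :: rest => List.replicate n '*' ++ trW w ++ renderTail w.length rest

def renderAll : List (List Char) → List Char
  | [] => []
  | w :: rest => trW w ++ renderTail w.length rest

theorem renderTail_nil (n : Nat) : renderTail n [] = [] := rfl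

theorem renderTail_cons (n : Nat) (w : List Char) (rest : List (List Char)) :
    renderTail n (w :: rest) = List.replicate n '*' ++ trW w ++ renderTail w.length rest := rfl

theorem renderAll_cons (w : List Char) (rest : List (List Char)) :
    renderAll (w :: rest) = trW w ++ renderTail w.length rest := rfl

theorem renderTail_cons_all (n : Nat) (ws : List (List Char)) (h : ws ≠ []) :
    renderTail n ws = List.replicate n '*' ++ renderAll ws := by
  cases ws with
  | nil => exact absurd rfl h
  | cons w rest => simp [renderTail_cons, renderAll_cons, List.append_assoc]

theorem trW_append_singleton (pre : List Char) (c : Char) :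
    trW (pre ++ [c]) = trW pre ++ trC c := by
  simp [trW]

-- the bridge: A's character-by-character output equals B's word-by-word output
theorem gA_render (cs : List Char) : ∀ (pre : List Char),
    trW pre ++ gA cs pre.length = renderAll (pySplitSp pre cs) := by
  induction cs with
  | nil => intro pre; simp [gA, pySplitSp, renderAll_cons, renderTail_nil]
  | cons c r ih =>
    intro pre
    by_cases h : c = ' '
    · subst h
      have e1 : pySplitSp pre (' ' :: r) = pre :: pySplitSp [] r := by simp [pySplitSp]
      have e2 : gA (' ' :: r) pre.length = List.replicate pre.length '*' ++ gA r 0 := by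
        simp [gA]
      rw [e1, e2, renderAll_cons, renderTail_cons_all pre.length _ (pySplitSp_ne_nil [] r),
        ← ih []]
      simp [trW]
    · have e1 : pySplitSp pre (c :: r) = pySplitSp (pre ++ [c]) r := by simp [pySplitSp, h]
      have e2 : gA (c :: r) pre.length = trC c ++ gA r (pre.length + 1) := by simp [gA, h]
      rw [e1, e2, ← ih (pre ++ [c]), trW_append_singleton]
      simp [List.append_assoc]

theorem intercalate_nil_flatten (l : List (List Char)) :
    List.intercalate ([] : List Char) l = l.flatten := by
  induction l with
  | nil => rfl
  | cons a t ih =>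
    cases t with
    | nil => simp [List.intercalate, List.intersperse]
    | cons b u =>
      simp only [List.intercalate, List.intersperse] at *
      simp [ih]

-- B's per-word translation is trW
set_option maxRecDepth 100000 in
theorem traduz_eq (w : List Char) : traduzB w = trW w := by
  unfold traduzB trW
  rw [show PySem.Chars.join ([] : List Char) = List.intercalate ([] : List Char) from rfl,
    intercalate_nil_flatten]
  have hc : ∀ c ∈ w, (tabelaB.getD ((c.toNat : Int)) (String.singleton c)).toList = trC c := by
    intro c _
    rw [tabelaB_eq, PySem.Dict.getD_eq_get?_getD]
    cases h : mapaLetras.get? ((c.toNat : Int)) with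
    | none => simp [trC, h]
    | some v => simp [trC, h]
  rw [List.map_congr_left hc]

-- B's joining loop over zip(palavras, palavras[1:])
theorem zipfold (rest : List (List Char)) : ∀ (p : List Char) (acc : List Char),
    (List.zip (p :: rest) rest).foldl
        (fun s pr => s ++ List.replicate pr.1.length '*' ++ traduzB pr.2) acc
      = acc ++ renderTail p.length rest := by
  induction rest with
  | nil => intro p acc; simp [renderTail_nil]
  | cons w r ih =>
    intro p acc
    simp only [List.zip_cons_cons, List.foldl_cons]
    rw [ih w, traduz_eq, renderTail_cons]
    simp [List.append_assoc]

-- ===== VERDICT (by name: the statement is the Claim_ definition above) =====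
set_option maxRecDepth 100000 in
theorem ofuscador_spec : Claim_equal_ofuscador := by
  intro linha _
  unfold Spec_ofuscador ofuscador ofuscador_alt
  rw [foldA, splitOn_eq]
  cases hs : pySplitSp [] linha.toList with
  | nil => exact absurd hs (pySplitSp_ne_nil [] linha.toList)
  | cons w0 rest =>
    have hget : (PySem.List.pyGet? (w0 :: rest) 0).getD [] = w0 := by
      rw [show (0 : Int) = ((0 : Nat) : Int) from rfl, PySem.List.pyGet?_natCast]; rfl
    have hslice : PySem.List.slice (w0 :: rest) (some 1) none = rest := by
      rw [PySem.List.slice_from (w0 :: rest) (a := 1) (by norm_num)]; rfl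
    simp only [hget, hslice]
    rw [zipfold rest w0 (traduzB w0), traduz_eq]
    have hg := gA_render linha.toList []
    simp only [trW, List.map_nil, List.flatten_nil, List.nil_append, List.length_nil] at hg
    rw [hg, hs, renderAll_cons]
    simp
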